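-- pv_equiv track=rewrite | github.com/Robins1225a/loRa | lora.py | deinterleave
-- ===== SOURCE A (Python) =====
-- def deinterleave(data, rows, cols):
--     if len(data) != rows * cols:
--         raise ValueError("Data size must match rows * cols.")
--     matrix = [[0] * cols for _ in range(rows)]
--     index = 0
--     for col in range(cols):
--         for row in range(rows):
--             matrix[row][col] = data[index]
--             index += 1
--     deinterleaved = []
--     for row in range(rows):
--         deinterleaved.extend(matrix[row])
--     return deinterleaved
-- ===== SOURCE B (Python) =====
-- def deinterleave(data, rows, cols):
--     if len(data) != rows * cols:
--         raise ValueError("Data size must match rows * cols.")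
--     # output position (r, c) holds data[c*rows + r]; no intermediate matrix
--     return [data[c * rows + r] for r in range(rows) for c in range(cols)]
-- ===== Notes on version B (the rewrite author's own statement) =====
-- stated objective: simpler
-- what changed: Drops the two-phase fill-a-2D-matrix-then-flatten structure: the output is produced in one pass by the closed-form index permutation data[c*rows + r].
import Mathlib
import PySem

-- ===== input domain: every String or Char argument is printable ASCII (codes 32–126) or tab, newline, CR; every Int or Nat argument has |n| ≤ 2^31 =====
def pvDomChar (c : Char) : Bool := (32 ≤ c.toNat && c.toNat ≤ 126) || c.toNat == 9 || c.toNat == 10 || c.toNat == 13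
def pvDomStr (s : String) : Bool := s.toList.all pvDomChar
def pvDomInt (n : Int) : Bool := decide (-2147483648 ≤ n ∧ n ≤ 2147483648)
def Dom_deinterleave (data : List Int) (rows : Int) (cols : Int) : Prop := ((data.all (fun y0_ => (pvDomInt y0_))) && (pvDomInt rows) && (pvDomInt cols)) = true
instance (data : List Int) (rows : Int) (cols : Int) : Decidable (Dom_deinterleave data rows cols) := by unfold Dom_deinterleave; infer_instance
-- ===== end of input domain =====

-- B replaces A's fill-column-major-matrix-then-flatten with one direct pass using the
-- closed-form index permutation data[c*rows + r] (objective: simpler; same asymptotic cost).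

-- ===== PORT A =====
-- matrix[row][col] = data[index]: under Pre_ every executed element access is in range,
-- so transcribing data[index] as pyGetD (never hit out of range there) is exact.
def deinterleave (data : List Int) (rows : Int) (cols : Int) : List Int :=
  let matrix : List (List Int) := (PySem.List.pyRange 0 rows 1).map (fun _ => List.replicate cols.toNat 0)
  let st : List (List Int) × Int :=
    (PySem.List.pyRange 0 cols 1).foldl (fun st col =>
      (PySem.List.pyRange 0 rows 1).foldl (fun (st : List (List Int) × Int) row =>
        (st.1.set row.toNat ((st.1.getD row.toNat []).set col.toNat (PySem.List.pyGetD data st.2 0)),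
         st.2 + 1)) st)
      (matrix, 0)
  (PySem.List.pyRange 0 rows 1).foldl (fun acc row => acc ++ st.1.getD row.toNat []) []

-- ===== PORT B =====
def deinterleave_alt (data : List Int) (rows : Int) (cols : Int) : List Int :=
  (PySem.List.pyRange 0 rows 1).flatMap (fun r =>
    (PySem.List.pyRange 0 cols 1).map (fun c => PySem.List.pyGetD data (c * rows + r) 0))

-- ===== PRECONDITION & SPEC =====
-- A raises ValueError unless len(data) == rows * cols; Pre_ is exactly that guard.
def Pre_deinterleave (data : List Int) (rows : Int) (cols : Int) : Prop :=
  (data.length : Int) = rows * cols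
instance (data : List Int) (rows : Int) (cols : Int) : Decidable (Pre_deinterleave data rows cols) := by
  unfold Pre_deinterleave; infer_instance

def pvWitness_deinterleave : List Int × Int × Int := ([1, 2, 3, 4, 5, 6], 2, 3)

def Spec_deinterleave (data : List Int) (rows : Int) (cols : Int) (out : List Int) : Prop := out = deinterleave_alt data rows cols
instance (data : List Int) (rows : Int) (cols : Int) (out : List Int) : Decidable (Spec_deinterleave data rows cols out) := by unfold Spec_deinterleave; infer_instance

-- ===== CLAIM (what is proved, stated in full; the proofs are below) =====
def Claim_equal_deinterleave : Prop := ∀ (data : List Int) (rows : Int) (cols : Int), Dom_deinterleave data rows cols → Pre_deinterleave data rows cols → Spec_deinterleave data rows cols (deinterleave data rows cols)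

-- ===== LEMMAS AND PROOFS =====

theorem map_getD_range {α : Type} (l : List α) (d : α) :
    (List.range l.length).map (fun r => l[r]?.getD d) = l := by
  apply List.ext_getElem
  · simp
  · intro i h1 h2
    simp only [List.getElem_map, List.getElem_range]
    rw [List.getElem?_eq_getElem h2]
    rfl

-- inner loop: fill column ct of every row, advancing the data index
theorem inner_fill (data : List Int) (ct : ℕ) (R : ℕ) (m : List (List Int)) (idx : Int) :
    (List.range R).foldl (fun (st : List (List Int) × Int) (row : ℕ) =>
        (st.1.set row ((st.1.getD row []).set ct (PySem.List.pyGetD data st.2 0)),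
         st.2 + 1)) (m, idx)
      = ((List.range m.length).map (fun r =>
            if r < R then (m.getD r []).set ct (PySem.List.pyGetD data (idx + r) 0)
            else m.getD r []),
         idx + R) := by
  induction R with
  | zero => simp [List.getD_eq_getElem?_getD, map_getD_range]
  | succ R ih =>
    rw [List.range_succ, List.foldl_append, ih]
    simp only [List.foldl_cons, List.foldl_nil, Prod.mk.injEq]
    refine ⟨?_, by push_cast; ring⟩
    apply List.ext_getElem
    · simp
    intro j hj hj'
    simp only [List.length_map, List.length_range] at hj'
    rw [List.getElem_set]
    by_cases hR : R = j
    · subst hR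
      have hgd : ((List.range m.length).map (fun r =>
          if r < R then (m.getD r []).set ct (PySem.List.pyGetD data (idx + ↑r) 0)
          else m.getD r [])).getD R [] = m.getD R [] := by
        rw [List.getD_eq_getElem?_getD]
        simp [hj']
      simp only [hgd]
      simp [hj']
    · simp only [List.getElem_map, List.getElem_range]
      split_ifs with h1 h2 h2 <;> first | rfl | omega

-- outer loop: after the first c columns the matrix holds data[j*R + r] at (r, j), j < c
theorem outer_fill (data : List Int) (R : ℕ) (C : ℕ) (c : ℕ) (hc : c ≤ C) :
    (List.range c).foldl (fun (st : List (List Int) × Int) (col : ℕ) =>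
      (List.range R).foldl (fun (st : List (List Int) × Int) (row : ℕ) =>
        (st.1.set row ((st.1.getD row []).set col (PySem.List.pyGetD data st.2 0)),
         st.2 + 1)) st)
      ((List.range R).map (fun _ => List.replicate C 0), 0)
      = ((List.range R).map (fun (r : ℕ) =>
            (List.range C).map (fun (j : ℕ) =>
              if j < c then PySem.List.pyGetD data ((j : Int) * (R : Int) + (r : Int)) 0 else 0)),
         (c : Int) * (R : Int)) := by
  induction c with
  | zero => simp [List.map_const']
  | succ c ih =>
    rw [List.range_succ, List.foldl_append, ih (le_of_lt (Nat.lt_of_succ_le hc))]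
    simp only [List.foldl_cons, List.foldl_nil]
    rw [inner_fill]
    simp only [List.length_map, List.length_range, Prod.mk.injEq]
    refine ⟨?_, by push_cast; ring⟩
    apply List.ext_getElem
    · simp
    intro r h1 h2
    simp only [List.length_map, List.length_range] at h2
    have hr : r < R := h2
    simp only [List.getElem_map, List.getElem_range, if_pos hr]
    have hgd : ((List.range R).map (fun (r : ℕ) =>
        (List.range C).map (fun (j : ℕ) =>
          if j < c then PySem.List.pyGetD data ((j : Int) * (R : Int) + (r : Int)) 0 else 0))).getD r []
        = (List.range C).map (fun (j : ℕ) =>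
          if j < c then PySem.List.pyGetD data ((j : Int) * (R : Int) + (r : Int)) 0 else 0) := by
      rw [List.getD_eq_getElem?_getD]
      simp [hr]
    rw [hgd]
    apply List.ext_getElem
    · simp
    intro j j1 j2
    simp only [List.length_map, List.length_range] at j2
    rw [List.getElem_set]
    simp only [List.getElem_map, List.getElem_range]
    by_cases hcj : c = j
    · subst hcj
      simp
    · simp only [if_neg hcj]
      split_ifs with a1 a2 a2 <;> first | rfl | omega

-- ===== VERDICT (by name: the statement is the Claim_ definition above) =====
theorem deinterleave_spec : Claim_equal_deinterleave := by
  intro data rows cols _ _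
  unfold Spec_deinterleave deinterleave deinterleave_alt
  by_cases hr0 : rows ≤ 0
  · rw [PySem.List.pyRange_one_eq_nil hr0]
    simp
  push Not at hr0
  by_cases hc0 : cols ≤ 0
  · rw [PySem.List.pyRange_one_eq_nil hc0]
    rw [Int.toNat_of_nonpos hc0]
    simp
  push Not at hc0
  obtain ⟨R, hR⟩ : ∃ R : ℕ, rows = (R : Int) := ⟨rows.toNat, (Int.toNat_of_nonneg hr0.le).symm⟩
  obtain ⟨C, hC⟩ : ∃ C : ℕ, cols = (C : Int) := ⟨cols.toNat, (Int.toNat_of_nonneg hc0.le).symm⟩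
  subst hR hC
  rw [PySem.List.pyRange_zero_natCast R, PySem.List.pyRange_zero_natCast C]
  simp only [List.foldl_map, List.map_map, Function.comp_def, Int.toNat_natCast]
  rw [outer_fill data R C C le_rfl]
  rw [PySem.List.foldl_append_eq_flatMap]
  rw [List.flatMap_map]
  simp only [List.nil_append]
  refine congrArg List.flatten ?_
  apply List.map_congr_left
  intro r hrm
  have hr : r < R := List.mem_range.mp hrm
  rw [List.getD_eq_getElem?_getD]
  simp only [List.getElem?_map, List.getElem?_range, hr, Option.map_some, Option.getD_some]
  apply List.map_congr_left
  intro j hj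
  rw [if_pos (List.mem_range.mp hj)]
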